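-- pv_equiv track=rewrite | github.com/tewhalen/1909 | processors/ocr_column.py | probable_street_name
-- ===== SOURCE A (Python) =====
-- def probable_street_name(text: str):
--     for substr in (
--         "Street",
--         "Court",
--         "Avenue",
--         "North",
--         "South",
--         "Place",
--         "East",
--         "West",
--     ):
--         if substr in text:
--             return True
--     return False
-- ===== SOURCE B (Python) =====
-- def probable_street_name(text: str):
--     kws = ("Street", "Court", "Avenue", "North", "South", "Place", "East", "West")
--     return any(
--         text.startswith(k, i) for i in range(len(text) + 1) for k in kws
--     )
-- ===== Notes on version B (the rewrite author's own statement) =====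
-- stated objective: alternative
-- what changed: B makes a single left-to-right scan over the text, testing at each position whether any keyword starts there, instead of A's eight separate full substring searches with early return.
import Mathlib
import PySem

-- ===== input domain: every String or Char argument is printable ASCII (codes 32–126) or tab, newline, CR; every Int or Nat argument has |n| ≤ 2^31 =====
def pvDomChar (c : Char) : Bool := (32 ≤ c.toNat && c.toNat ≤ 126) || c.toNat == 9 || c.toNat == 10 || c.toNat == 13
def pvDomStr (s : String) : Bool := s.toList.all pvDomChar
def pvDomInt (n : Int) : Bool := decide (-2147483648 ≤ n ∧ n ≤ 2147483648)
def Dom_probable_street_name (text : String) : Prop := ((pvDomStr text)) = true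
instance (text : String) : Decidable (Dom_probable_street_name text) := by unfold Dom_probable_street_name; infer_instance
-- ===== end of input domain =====

-- B replaces A's eight separate substring searches by a single positional scan; objective: alternative.

-- ===== PORT A =====
def pvKeywords : List String :=
  ["Street", "Court", "Avenue", "North", "South", "Place", "East", "West"]

-- A: loop over the keywords, return True on the first one contained in text (early return via `any`).
def probable_street_name (text : String) : Bool :=
  pvKeywords.any (fun sub => PySem.Str.isIn sub text)

-- ===== PORT B =====
-- at one position: does any keyword start here?  (text.startswith(k, i))
def pvMatchHere (cs : List Char) : Bool :=
  pvKeywords.any (fun k => PySem.Chars.startswith cs k.toList)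

-- B: single scan over positions 0..len(text) of the text.
def pvScan (cs : List Char) : Bool :=
  if pvMatchHere cs then true
  else
    match cs with
    | [] => false
    | _ :: rest => pvScan rest

def probable_street_name_alt (text : String) : Bool :=
  pvScan text.toList

-- ===== PRECONDITION & SPEC =====
def Spec_probable_street_name (text : String) (out : Bool) : Prop := out = probable_street_name_alt text
instance (text : String) (out : Bool) : Decidable (Spec_probable_street_name text out) := by unfold Spec_probable_street_name; infer_instance

-- ===== CLAIM (what is proved, stated in full; the proofs are below) =====
def Claim_equal_probable_street_name : Prop := ∀ (text : String), Dom_probable_street_name text → Spec_probable_street_name text (probable_street_name text)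

-- ===== LEMMAS AND PROOFS =====

theorem pvScan_iff (cs : List Char) :
    pvScan cs = true ↔ ∃ k ∈ pvKeywords, k.toList <:+: cs := by
  induction cs with
  | nil =>
    simp [pvScan, pvMatchHere, List.any_eq_true, PySem.Chars.startswith_iff]
  | cons c rest ih =>
    rw [pvScan]
    by_cases h : pvMatchHere (c :: rest) = true
    · simp only [h, if_true, true_iff]
      rcases (by simpa [pvMatchHere, List.any_eq_true, PySem.Chars.startswith_iff] using h :
        ∃ k ∈ pvKeywords, k.toList <+: c :: rest) with ⟨k, hk, hpre⟩
      exact ⟨k, hk, hpre.isInfix⟩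
    · simp only [h, Bool.false_eq_true, if_false]
      rw [ih]
      constructor
      · rintro ⟨k, hk, hinf⟩
        exact ⟨k, hk, hinf.trans (List.suffix_cons c rest).isInfix⟩
      · rintro ⟨k, hk, hinf⟩
        rcases List.infix_cons_iff.mp hinf with hpre | hinf'
        · exact absurd (by
            simp [pvMatchHere, List.any_eq_true, PySem.Chars.startswith_iff]
            exact ⟨k, hk, hpre⟩) h
        · exact ⟨k, hk, hinf'⟩

theorem pvA_iff (text : String) :
    probable_street_name text = true ↔ ∃ k ∈ pvKeywords, k.toList <:+: text.toList := by
  simp [probable_street_name, List.any_eq_true, PySem.Chars.isIn_iff_infix]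

-- ===== VERDICT (by name: the statement is the Claim_ definition above) =====
theorem probable_street_name_spec : Claim_equal_probable_street_name := by
  intro text _
  unfold Spec_probable_street_name probable_street_name_alt
  rw [Bool.eq_iff_iff, pvA_iff, pvScan_iff]
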